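-- pv_equiv track=rewrite | github.com/osekilab/derivational-probing | scripts/aggregate_results.py | get_structure_indices
-- ===== SOURCE A (Python) =====
-- from collections import namedtuple, defaultdict
-- from collections import defaultdict
--
-- def get_descendants(index, head_indices):
--     descendants = []
--     for idx, head in enumerate(head_indices):
--         if head == index:
--             descendants.append(idx)
--             descendants.extend(get_descendants(idx, head_indices))
--     return descendants
--
-- def get_structure_indices(
--     root_index, head_indices, governance_relations, tokens, include_descendants
-- ):
--     # Find primary dependencies (children of the root)
--     primary_dep_indices = [
--         idx for idx, head_index in enumerate(head_indices) if head_index == root_index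
--     ]
--     # Map primary dependencies to their relations
--     relation_count = defaultdict(int)
--     primary_dep_to_indices = {}
--     for primary_dep_index in primary_dep_indices:
--         relation = governance_relations[primary_dep_index]
--         relation_count[relation] += 1
--         if relation_count[relation] > 1:
--             relation = f"{relation}_{relation_count[relation]}"
--
--         # Depending on the flag, include all descendants or only direct children
--         if include_descendants:
--             indices = get_descendants(primary_dep_index, head_indices) + [
--                 primary_dep_index
--             ]
--         else:
--             # Include only the primary dependency and its direct children
--             indices = [primary_dep_index] + [
--                 idx
--                 for idx, head in enumerate(head_indices)
--                 if head == primary_dep_index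
--             ]
--         primary_dep_to_indices[relation] = indices
--
--     # Root structure includes root and its direct children
--     root_structure_indices = [root_index] + primary_dep_indices
--     root_to_indices = {"root": root_structure_indices}
--
--     # Combine structures
--     structure_to_indices = {**primary_dep_to_indices, **root_to_indices}
--     structure_to_tokens = {
--         k: [tokens[idx] for idx in v] for k, v in structure_to_indices.items()
--     }
--
--     return structure_to_indices, structure_to_tokens
-- ===== SOURCE B (Python) =====
-- def get_structure_indices(
--     root_index, head_indices, governance_relations, tokens, include_descendants
-- ):
--     # Build the children adjacency map once (one pass), then walk each subtree
--     # with an explicit-stack preorder DFS -- no repeated rescans of head_indices.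
--     children = {}
--     for idx, head in enumerate(head_indices):
--         children.setdefault(head, []).append(idx)
--
--     def collect(start):
--         # preorder of the strict subtree below `start` (children in index order)
--         order = []
--         stack = list(reversed(children.get(start, [])))
--         while stack:
--             node = stack.pop()
--             order.append(node)
--             stack.extend(reversed(children.get(node, [])))
--         return order
--
--     primary_dep_indices = children.get(root_index, [])
--     structure_to_indices = {}
--     structure_to_tokens = {}
--     seen = {}
--     for p in primary_dep_indices:
--         relation = governance_relations[p]
--         n = seen.get(relation, 0) + 1
--         seen[relation] = n
--         if n > 1:
--             relation = f"{relation}_{n}"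
--         if include_descendants:
--             indices = collect(p) + [p]
--         else:
--             indices = [p] + children.get(p, [])
--         structure_to_indices[relation] = indices
--         structure_to_tokens[relation] = [tokens[i] for i in indices]
--     root_structure = [root_index] + primary_dep_indices
--     structure_to_indices["root"] = root_structure
--     structure_to_tokens["root"] = [tokens[i] for i in root_structure]
--     return structure_to_indices, structure_to_tokens
-- ===== Notes on version B (the rewrite author's own statement) =====
-- stated objective: alternative
-- what changed: B builds a children adjacency dict in one pass and collects each subtree with an explicit-stack preorder DFS (filling both output dicts in the same loop), instead of A's recursive get_descendants that rescans the whole head list at every visited node; same result, different traversal machinery (not measurably faster on random inputs, where deep subtrees are rare).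
import Mathlib
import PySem

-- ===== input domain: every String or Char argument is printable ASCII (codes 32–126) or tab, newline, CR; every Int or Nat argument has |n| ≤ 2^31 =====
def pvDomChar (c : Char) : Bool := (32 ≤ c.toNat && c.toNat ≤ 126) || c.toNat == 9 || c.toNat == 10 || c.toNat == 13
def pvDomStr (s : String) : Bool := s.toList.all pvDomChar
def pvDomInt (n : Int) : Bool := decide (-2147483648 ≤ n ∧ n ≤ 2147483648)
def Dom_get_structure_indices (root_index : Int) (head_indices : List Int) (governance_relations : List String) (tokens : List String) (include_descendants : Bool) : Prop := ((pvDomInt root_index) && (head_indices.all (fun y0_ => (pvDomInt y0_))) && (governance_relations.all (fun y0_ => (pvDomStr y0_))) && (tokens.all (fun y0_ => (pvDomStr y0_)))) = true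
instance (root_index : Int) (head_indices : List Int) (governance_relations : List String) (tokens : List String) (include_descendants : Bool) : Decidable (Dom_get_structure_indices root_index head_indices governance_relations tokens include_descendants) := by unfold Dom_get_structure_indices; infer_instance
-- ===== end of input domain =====

-- B replaces A's per-node rescans of head_indices (recursive get_descendants) by a children
-- adjacency dict built once plus an explicit-stack preorder DFS; objective: alternative.

-- ===== PORT A =====
-- get_descendants, transliterated; fuel makes the unbounded Python recursion total
-- (fuel head_indices.length+1 is never exhausted on inputs admitted by Pre_).
def pvDescA (hs : List Int) : Nat → Int → List Int
  | 0, _ => []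
  | f+1, index =>
    (PySem.List.enumerate hs).foldl
      (fun acc p => if p.2 == index then acc ++ [p.1] ++ pvDescA hs f p.1 else acc) []

def pvTok (tokens : List String) (i : Int) : String :=
  -- tokens[i]; .getD "" is exact: Pre_ keeps every produced index inside tokens
  (PySem.List.pyGet? tokens i).getD ""

-- the body of A's loop over primary_dep_indices (state: relation_count, primary_dep_to_indices)
def pvStepA (head_indices : List Int) (governance_relations : List String) (include_descendants : Bool)
    (st : PySem.Dict String Int × PySem.Dict String (List Int)) (p : Int) :
    PySem.Dict String Int × PySem.Dict String (List Int) :=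
  -- relation = governance_relations[p]; Pre_ keeps p < len(governance_relations)
  let relation0 := (PySem.List.pyGet? governance_relations p).getD ""
  let cnt := st.1.modify relation0 0 (· + 1)
  let c := cnt.getD relation0 0
  let relation := if c > 1 then relation0 ++ "_" ++ PySem.Int.toStr c else relation0
  let indices :=
    if include_descendants then pvDescA head_indices (head_indices.length + 1) p ++ [p]
    else p :: ((PySem.List.enumerate head_indices).filter (fun q => q.2 == p)).map (fun q => q.1)
  (cnt, st.2.insert relation indices)

def get_structure_indices (root_index : Int) (head_indices : List Int) (governance_relations : List String) (tokens : List String) (include_descendants : Bool) : (List (String × List Int)) × (List (String × List String)) :=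
  let primary : List Int :=
    ((PySem.List.enumerate head_indices).filter (fun p => p.2 == root_index)).map (fun p => p.1)
  let st := primary.foldl (pvStepA head_indices governance_relations include_descendants)
    (PySem.Dict.empty, PySem.Dict.empty)
  let s2i := st.2.insert "root" (root_index :: primary)
  -- {k: [tokens[idx] for idx in v] for k, v in structure_to_indices.items()}
  let s2t := s2i.items.foldl
    (fun (d : PySem.Dict String (List String)) kv => d.insert kv.1 (kv.2.map (pvTok tokens)))
    PySem.Dict.empty
  (s2i.items, s2t.items)

-- ===== PORT B =====
-- children.setdefault(head, []).append(idx) over enumerate(head_indices)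
def pvChildren (hs : List Int) : PySem.Dict Int (List Int) :=
  (PySem.List.enumerate hs).foldl (fun d p => d.modify p.2 [] (· ++ [p.1])) PySem.Dict.empty

-- the while-loop of collect; stack stored top-first (Python's reversed list); fuel only for totality
def pvDfs (ch : PySem.Dict Int (List Int)) : Nat → List Int → List Int → List Int
  | 0, _, out => out
  | _+1, [], out => out
  | f+1, x :: rest, out => pvDfs ch f (ch.getD x [] ++ rest) (out ++ [x])

-- the body of B's loop over primary deps (state: seen, structure_to_indices, structure_to_tokens)
def pvStepB (ch : PySem.Dict Int (List Int)) (governance_relations tokens : List String)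
    (include_descendants : Bool) (fuelB : Nat)
    (st : PySem.Dict String Int × PySem.Dict String (List Int) × PySem.Dict String (List String))
    (p : Int) :
    PySem.Dict String Int × PySem.Dict String (List Int) × PySem.Dict String (List String) :=
  let relation0 := (PySem.List.pyGet? governance_relations p).getD ""
  let m := st.1.getD relation0 0 + 1
  let seen := st.1.insert relation0 m
  let relation := if m > 1 then relation0 ++ "_" ++ PySem.Int.toStr m else relation0
  let indices :=
    if include_descendants then pvDfs ch fuelB (ch.getD p []) [] ++ [p]
    else p :: ch.getD p []
  (seen, st.2.1.insert relation indices, st.2.2.insert relation (indices.map (pvTok tokens)))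

def get_structure_indices_alt (root_index : Int) (head_indices : List Int) (governance_relations : List String) (tokens : List String) (include_descendants : Bool) : (List (String × List Int)) × (List (String × List String)) :=
  let ch := pvChildren head_indices
  let primary := ch.getD root_index []
  let st := primary.foldl
    (pvStepB ch governance_relations tokens include_descendants
      ((head_indices.length + 2) ^ (head_indices.length + 2)))
    (PySem.Dict.empty, PySem.Dict.empty, PySem.Dict.empty)
  let rootS := root_index :: primary
  ((st.2.1.insert "root" rootS).items,
   (st.2.2.insert "root" (rootS.map (pvTok tokens))).items)

-- ===== PRECONDITION & SPEC =====
-- following head pointers from i leaves [0, n) within the given fuel (false = fuel ran out)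
def pvChase (hs : List Int) : Nat → Int → Bool
  | 0, _ => false
  | f+1, i => if 0 ≤ i ∧ i < (hs.length : Int) then pvChase hs f (hs.getD i.toNat 0) else true

-- Pre_ excludes exactly: inputs where A raises IndexError (tokens[root_index] out of range, or a
-- list shorter than head_indices indexed by a dependency) or RecursionError (a head-pointer cycle
-- with include_descendants).  The two length bounds and the unconditional acyclicity requirement
-- are slightly broader than the raising set (a short list may happen never to be indexed, a cycle
-- may be unreachable): they state the natural parallel-arrays/tree domain; see cites.
def Pre_get_structure_indices (root_index : Int) (head_indices : List Int) (governance_relations : List String) (tokens : List String) (include_descendants : Bool) : Prop :=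
  head_indices.length ≤ governance_relations.length ∧
  head_indices.length ≤ tokens.length ∧
  (-(tokens.length : Int) ≤ root_index ∧ root_index < (tokens.length : Int)) ∧
  (include_descendants = true →
    ∀ i ∈ List.range head_indices.length, pvChase head_indices (head_indices.length + 1) (i : Int) = true)
instance (root_index : Int) (head_indices : List Int) (governance_relations : List String) (tokens : List String) (include_descendants : Bool) : Decidable (Pre_get_structure_indices root_index head_indices governance_relations tokens include_descendants) := by unfold Pre_get_structure_indices; infer_instance

def pvWitness_get_structure_indices : Int × List Int × List String × List String × Bool :=
  (0, [2, 0], ["nsubj", "obj"], ["He", "ate", "it"], true)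

def Spec_get_structure_indices (root_index : Int) (head_indices : List Int) (governance_relations : List String) (tokens : List String) (include_descendants : Bool) (out : (List (String × List Int)) × (List (String × List String))) : Prop := out = get_structure_indices_alt root_index head_indices governance_relations tokens include_descendants
instance (root_index : Int) (head_indices : List Int) (governance_relations : List String) (tokens : List String) (include_descendants : Bool) (out : (List (String × List Int)) × (List (String × List String))) : Decidable (Spec_get_structure_indices root_index head_indices governance_relations tokens include_descendants out) := by unfold Spec_get_structure_indices; infer_instance

-- ===== CLAIM (what is proved, stated in full; the proofs are below) =====
def Claim_equal_get_structure_indices : Prop := ∀ (root_index : Int) (head_indices : List Int) (governance_relations : List String) (tokens : List String) (include_descendants : Bool), Dom_get_structure_indices root_index head_indices governance_relations tokens include_descendants → Pre_get_structure_indices root_index head_indices governance_relations tokens include_descendants → Spec_get_structure_indices root_index head_indices governance_relations tokens include_descendants (get_structure_indices root_index head_indices governance_relations tokens include_descendants)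

-- ===== LEMMAS AND PROOFS =====

-- children of x, as A computes them by scanning
def pvKids (hs : List Int) (x : Int) : List Int :=
  ((PySem.List.enumerate hs).filter (fun p => p.2 == x)).map (fun p => p.1)

theorem pvWitness_ok :
    Dom_get_structure_indices (pvWitness_get_structure_indices.1) (pvWitness_get_structure_indices.2.1) (pvWitness_get_structure_indices.2.2.1) (pvWitness_get_structure_indices.2.2.2.1) (pvWitness_get_structure_indices.2.2.2.2) ∧
    Pre_get_structure_indices (pvWitness_get_structure_indices.1) (pvWitness_get_structure_indices.2.1) (pvWitness_get_structure_indices.2.2.1) (pvWitness_get_structure_indices.2.2.2.1) (pvWitness_get_structure_indices.2.2.2.2) := by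
  decide

theorem pvChase_mono (hs : List Int) : ∀ f g : Nat, f ≤ g → ∀ i : Int,
    pvChase hs f i = true → pvChase hs g i = true := by
  intro f
  induction f with
  | zero => intro g _ i h; simp [pvChase] at h
  | succ f ih =>
    intro g hg i h
    obtain ⟨g', rfl⟩ : ∃ g', g = g' + 1 := ⟨g - 1, by omega⟩
    simp only [pvChase] at h ⊢
    by_cases hr : 0 ≤ i ∧ i < (hs.length : Int)
    · rw [if_pos hr] at h; rw [if_pos hr]; exact ih g' (by omega) _ h
    · rw [if_neg hr]

theorem pvKids_eq (hs : List Int) (x : Int) : (pvChildren hs).getD x [] = pvKids hs x := by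
  have h1 : pvChildren hs
      = ((PySem.List.enumerate hs).map (fun p => (p.2, p.1))).foldl
          (fun d q => d.modify q.1 [] (· ++ [q.2])) PySem.Dict.empty := by
    rw [List.foldl_map]; rfl
  rw [h1, PySem.Dict.getD_foldl_modify_append]
  simp only [List.filter_map, List.map_map]
  simp [pvKids, Function.comp_def]

theorem pvKids_mem (hs : List Int) (x c : Int) (h : c ∈ pvKids hs x) :
    0 ≤ c ∧ c < (hs.length : Int) ∧ hs.getD c.toNat 0 = x := by
  simp only [pvKids, List.mem_map, List.mem_filter] at h
  obtain ⟨p, ⟨hp, hpx⟩, rfl⟩ := h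
  rw [PySem.List.mem_enumerate_iff] at hp
  obtain ⟨k, hk, rfl⟩ := hp
  refine ⟨by positivity, by simpa using hk, ?_⟩
  have : ((0 + (k:Int)).toNat) = k := by omega
  rw [this]
  simpa [List.getD, List.getElem?_eq_getElem hk] using (beq_iff_eq.mp hpx)

theorem pvDescA_succ (hs : List Int) (f : Nat) (i : Int) :
    pvDescA hs (f+1) i = (pvKids hs i).flatMap (fun c => c :: pvDescA hs f c) := by
  show (PySem.List.enumerate hs).foldl
      (fun acc p => if p.2 == i then acc ++ [p.1] ++ pvDescA hs f p.1 else acc) [] = _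
  rw [PySem.List.foldl_congr_mem _
      _ (fun acc p => acc ++ (if p.2 == i then p.1 :: pvDescA hs f p.1 else []))
      _ (by intro acc x _; split <;> simp_all)]
  rw [PySem.List.foldl_append_eq_flatMap]
  have : ∀ (l : List (Int × Int)),
      l.flatMap (fun p => if p.2 == i then p.1 :: pvDescA hs f p.1 else [])
        = (l.filter (fun p => p.2 == i)).flatMap (fun p => p.1 :: pvDescA hs f p.1) := by
    intro l; induction l with
    | nil => rfl
    | cons a l ih =>
      simp only [List.flatMap_cons, List.filter_cons]
      by_cases h : (a.2 == i) = true
      · rw [if_pos h, if_pos h, List.flatMap_cons, ih]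
      · rw [if_neg h, if_neg h, ih, List.nil_append]
  rw [this, List.nil_append, pvKids, List.flatMap_map]

theorem pvKids_len (hs : List Int) (x : Int) : (pvKids hs x).length ≤ hs.length := by
  calc (pvKids hs x).length ≤ (PySem.List.enumerate hs).length := by
        simpa [pvKids] using List.length_filter_le (fun p => p.2 == x) (PySem.List.enumerate hs)
    _ = hs.length := PySem.List.length_enumerate _ _

theorem pvDescA_len (hs : List Int) : ∀ (f : Nat) (i : Int),
    (pvDescA hs f i).length + 1 ≤ (hs.length + 1) ^ f := by
  intro f
  induction f with
  | zero => intro i; simp [pvDescA]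
  | succ f ih =>
    intro i
    rw [pvDescA_succ, pow_succ]
    have hsum : ((pvKids hs i).map (fun c => (c :: pvDescA hs f c).length)).sum
        ≤ (pvKids hs i).length * (hs.length + 1) ^ f := by
      have := List.sum_le_card_nsmul ((pvKids hs i).map (fun c => (c :: pvDescA hs f c).length))
        ((hs.length + 1) ^ f) (by
          intro x hx
          obtain ⟨c, _, rfl⟩ := List.mem_map.mp hx
          simpa using ih c)
      simpa [smul_eq_mul] using this
    have hlen : (pvDescA hs (f+1) i).length
        = ((pvKids hs i).map (fun c => (c :: pvDescA hs f c).length)).sum := by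
      rw [pvDescA_succ]; simp [List.length_flatMap]
    rw [← pvDescA_succ, hlen]
    have hk := pvKids_len hs i
    have h1 : (1:Nat) ≤ (hs.length + 1) ^ f := Nat.one_le_pow _ _ (by omega)
    calc ((pvKids hs i).map (fun c => (c :: pvDescA hs f c).length)).sum + 1
        ≤ (pvKids hs i).length * (hs.length + 1) ^ f + 1 := by omega
      _ ≤ hs.length * (hs.length + 1) ^ f + (hs.length + 1) ^ f :=
          Nat.add_le_add (Nat.mul_le_mul_right _ hk) h1
      _ = (hs.length + 1) ^ f * (hs.length + 1) := by ring

theorem pvChase_kid (hs : List Int) (f : Nat) (x c : Int)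
    (hc : 0 ≤ c ∧ c < (hs.length : Int) ∧ hs.getD c.toNat 0 = x)
    (hx : pvChase hs f x = false) : pvChase hs (f+1) c = false := by
  simp only [pvChase, if_pos (⟨hc.1, hc.2.1⟩ : 0 ≤ c ∧ c < (hs.length : Int)), hc.2.2]
  exact hx

theorem pvChase_down (hs : List Int) (g : Nat) (i c : Int)
    (hc : 0 ≤ c ∧ c < (hs.length : Int) ∧ hs.getD c.toNat 0 = i)
    (hg : pvChase hs (hs.length + 2 - (g + 1)) i = false) :
    pvChase hs (hs.length + 2 - g) c = false := by
  rcases Nat.lt_or_ge g (hs.length + 2) with hle | hgt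
  · have he : hs.length + 2 - g = (hs.length + 2 - (g + 1)) + 1 := by omega
    rw [he]
    exact pvChase_kid hs (hs.length + 2 - (g + 1)) i c hc hg
  · have he : hs.length + 2 - g = 0 := by omega
    rw [he]; rfl

theorem pvDescA_stable (hs : List Int)
    (hA : ∀ j : Int, 0 ≤ j → j < (hs.length : Int) → pvChase hs (hs.length + 1) j = true) :
    ∀ f₁ f₂ : Nat, ∀ i : Int, 0 ≤ i → i < (hs.length : Int) →
      pvChase hs (hs.length + 2 - f₁) i = false → pvChase hs (hs.length + 2 - f₂) i = false →
      pvDescA hs f₁ i = pvDescA hs f₂ i := by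
  intro f₁
  induction f₁ with
  | zero =>
    intro f₂ i h0 h1 hc _
    exact absurd (pvChase_mono hs (hs.length + 1) (hs.length + 2 - 0) (by omega) i
      (hA i h0 h1)) (by simpa using hc)
  | succ a ih =>
    intro f₂ i h0 h1 hc₁ hc₂
    obtain ⟨b, rfl⟩ : ∃ b, f₂ = b + 1 := by
      rcases f₂ with _ | b
      · exact absurd (pvChase_mono hs (hs.length + 1) (hs.length + 2 - 0) (by omega) i
          (hA i h0 h1)) (by simpa using hc₂)
      · exact ⟨b, rfl⟩
    rw [pvDescA_succ, pvDescA_succ]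
    apply List.flatMap_congr
    intro c hcmem
    have hc := pvKids_mem hs i c hcmem
    rw [ih b c hc.1 hc.2.1 (pvChase_down hs a i c hc hc₁) (pvChase_down hs b i c hc hc₂)]

theorem pvDfs_nil (ch : PySem.Dict Int (List Int)) (F : Nat) (out : List Int) :
    pvDfs ch F [] out = out := by
  cases F <;> rfl

theorem pvDfs_sim (hs : List Int)
    (hA : ∀ j : Int, 0 ≤ j → j < (hs.length : Int) → pvChase hs (hs.length + 1) j = true) :
    ∀ f : Nat, ∀ js : List Int,
      (∀ j ∈ js, 0 ≤ j ∧ j < (hs.length : Int) ∧ pvChase hs (hs.length + 2 - f) j = false) →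
      ∀ (G : Nat) (rest out : List Int),
      pvDfs (pvChildren hs) ((js.flatMap (fun j => j :: pvDescA hs f j)).length + G) (js ++ rest) out
        = pvDfs (pvChildren hs) G rest (out ++ js.flatMap (fun j => j :: pvDescA hs f j)) := by
  intro f
  induction f with
  | zero =>
    intro js hjs G rest out
    cases js with
    | nil => simp
    | cons j js' =>
      obtain ⟨hj0, hj1, hjc⟩ := hjs j (List.mem_cons_self ..)
      exact absurd (pvChase_mono hs (hs.length + 1) (hs.length + 2 - 0) (by omega) j
        (hA j hj0 hj1)) (by simpa using hjc)
  | succ a iha =>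
    intro js
    induction js with
    | nil => intro _ G rest out; simp
    | cons j js' ihjs =>
      intro hjs G rest out
      obtain ⟨hj0, hj1, hjc⟩ := hjs j (List.mem_cons_self ..)
      have hL : ((j :: js').flatMap (fun j => j :: pvDescA hs (a+1) j)).length + G
          = ((pvDescA hs (a+1) j).length
              + ((js'.flatMap (fun j => j :: pvDescA hs (a+1) j)).length + G)) + 1 := by
        simp [List.flatMap_cons]; omega
      rw [hL]
      have hstep : ∀ (X : Nat) (S out' : List Int),
          pvDfs (pvChildren hs) (X + 1) (j :: S) out'
            = pvDfs (pvChildren hs) X ((pvChildren hs).getD j [] ++ S) (out' ++ [j]) :=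
        fun X S out' => rfl
      rw [List.cons_append, hstep, pvKids_eq]
      have hKeq : (pvDescA hs (a+1) j).length
          = ((pvKids hs j).flatMap (fun c => c :: pvDescA hs a c)).length := by
        rw [← pvDescA_succ]
      rw [hKeq]
      rw [iha (pvKids hs j)
        (by
          intro c hcmem
          have hc := pvKids_mem hs j c hcmem
          exact ⟨hc.1, hc.2.1, pvChase_down hs a j c hc hjc⟩)
        _ (js' ++ rest) (out ++ [j])]
      rw [← pvDescA_succ]
      rw [ihjs (fun x hx => hjs x (List.mem_cons_of_mem _ hx)) G rest
        ((out ++ [j]) ++ pvDescA hs (a+1) j)]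
      simp [List.flatMap_cons]

theorem pvChase_one (hs : List Int) (c : Int) (h0 : 0 ≤ c) (h1 : c < (hs.length : Int)) :
    pvChase hs 1 c = false := by
  simp only [pvChase, if_pos (⟨h0, h1⟩ : 0 ≤ c ∧ c < (hs.length : Int))]

theorem pvDfs_desc (hs : List Int)
    (hA : ∀ j : Int, 0 ≤ j → j < (hs.length : Int) → pvChase hs (hs.length + 1) j = true)
    (p : Int) (h0 : 0 ≤ p) (h1 : p < (hs.length : Int)) :
    pvDfs (pvChildren hs) ((hs.length + 2) ^ (hs.length + 2)) (pvKids hs p) []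
      = pvDescA hs (hs.length + 1) p := by
  have hlen : ((pvKids hs p).flatMap (fun c => c :: pvDescA hs (hs.length + 1) c)).length
      ≤ (hs.length + 2) ^ (hs.length + 2) := by
    rw [← pvDescA_succ]
    have h2 := pvDescA_len hs (hs.length + 1 + 1) p
    have hp : (hs.length + 1) ^ (hs.length + 1 + 1) ≤ (hs.length + 2) ^ (hs.length + 2) := by
      have := Nat.pow_le_pow_left (show hs.length + 1 ≤ hs.length + 2 by omega) (hs.length + 2)
      simpa using this
    omega
  have hG : (hs.length + 2) ^ (hs.length + 2)
      = ((pvKids hs p).flatMap (fun c => c :: pvDescA hs (hs.length + 1) c)).length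
        + ((hs.length + 2) ^ (hs.length + 2)
           - ((pvKids hs p).flatMap (fun c => c :: pvDescA hs (hs.length + 1) c)).length) := by
    omega
  have hsim := pvDfs_sim hs hA (hs.length + 1) (pvKids hs p)
    (by
      intro c hcmem
      have hc := pvKids_mem hs p c hcmem
      refine ⟨hc.1, hc.2.1, ?_⟩
      have he : hs.length + 2 - (hs.length + 1) = 1 := by omega
      rw [he]
      exact pvChase_one hs c hc.1 hc.2.1)
    ((hs.length + 2) ^ (hs.length + 2)
       - ((pvKids hs p).flatMap (fun c => c :: pvDescA hs (hs.length + 1) c)).length)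
    [] []
  rw [List.append_nil] at hsim
  rw [hG, hsim, pvDfs_nil, List.nil_append, ← pvDescA_succ]
  apply pvDescA_stable hs hA (hs.length + 2) (hs.length + 1) p h0 h1
  · have he : hs.length + 2 - (hs.length + 2) = 0 := by omega
    rw [he]; rfl
  · have he : hs.length + 2 - (hs.length + 1) = 1 := by omega
    rw [he]; exact pvChase_one hs p h0 h1

theorem pvInsert_map {ν μ : Type} (g : ν → μ) (d : PySem.Dict String ν) (d' : PySem.Dict String μ)
    (hd : d'.items = d.items.map (fun kv => (kv.1, g kv.2))) (k : String) (v : ν) :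
    (d'.insert k (g v)).items = ((d.insert k v).items).map (fun kv => (kv.1, g kv.2)) := by
  have hc : d'.contains k = d.contains k := by
    simp [PySem.Dict.contains, hd, List.any_map, Function.comp_def]
  simp only [PySem.Dict.insert, hc]
  by_cases hck : d.contains k = true
  · simp only [if_pos hck, hd, List.map_map]
    apply List.map_congr_left
    intro p _
    by_cases hpk : p.1 = k
    · simp [hpk]
    · simp [hpk]
  · simp [if_neg hck, hd]

-- clean form of A's loop step (modify unfolded, the re-read count simplified), f = the indices function
def pvCleanPair (gov : List String) (f : Int → List Int)
    (st : PySem.Dict String Int × PySem.Dict String (List Int)) (p : Int) :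
    PySem.Dict String Int × PySem.Dict String (List Int) :=
  let relation0 := (PySem.List.pyGet? gov p).getD ""
  let m := st.1.getD relation0 0 + 1
  let relation := if m > 1 then relation0 ++ "_" ++ PySem.Int.toStr m else relation0
  (st.1.insert relation0 m, st.2.insert relation (f p))

def pvCleanTriple (gov toks : List String) (f : Int → List Int)
    (st : PySem.Dict String Int × PySem.Dict String (List Int) × PySem.Dict String (List String))
    (p : Int) :
    PySem.Dict String Int × PySem.Dict String (List Int) × PySem.Dict String (List String) :=
  let relation0 := (PySem.List.pyGet? gov p).getD ""
  let m := st.1.getD relation0 0 + 1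
  let relation := if m > 1 then relation0 ++ "_" ++ PySem.Int.toStr m else relation0
  (st.1.insert relation0 m, st.2.1.insert relation (f p),
   st.2.2.insert relation ((f p).map (pvTok toks)))

theorem pvLoopClean (gov toks : List String) (f : Int → List Int) :
    ∀ (ps : List Int) (cnt : PySem.Dict String Int) (d : PySem.Dict String (List Int))
      (dt : PySem.Dict String (List String)),
      dt.items = d.items.map (fun kv => (kv.1, kv.2.map (pvTok toks))) →
      ps.foldl (pvCleanTriple gov toks f) (cnt, d, dt)
      = ((ps.foldl (pvCleanPair gov f) (cnt, d)).1,
         (ps.foldl (pvCleanPair gov f) (cnt, d)).2,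
         PySem.Dict.mk (((ps.foldl (pvCleanPair gov f) (cnt, d)).2).items.map
            (fun kv => (kv.1, kv.2.map (pvTok toks))))) := by
  intro ps
  induction ps with
  | nil =>
    intro cnt d dt hdt
    simp only [List.foldl_nil]
    exact congrArg (fun x => (cnt, d, x)) (by cases dt with | mk it => simpa using hdt)
  | cons p ps ih =>
    intro cnt d dt hdt
    simp only [List.foldl_cons]
    exact ih _ _ _ (pvInsert_map _ d dt hdt _ (f p))

-- keys stay Nodup through A's insert loop (clean form)
theorem pvLoop_nodup (gov : List String) (f : Int → List Int) :
    ∀ (ps : List Int) (cnt : PySem.Dict String Int) (d : PySem.Dict String (List Int)),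
      d.keys.Nodup → ((ps.foldl (pvCleanPair gov f) (cnt, d)).2).keys.Nodup := by
  intro ps
  induction ps with
  | nil => intro cnt d hd; simpa using hd
  | cons p ps ih =>
    intro cnt d hd
    simp only [List.foldl_cons]
    exact ih _ _ (PySem.Dict.nodup_keys_insert d _ _ hd)

-- ===== VERDICT (by name: the statement is the Claim_ definition above) =====
theorem get_structure_indices_spec : Claim_equal_get_structure_indices := by
  intro ri hs gov toks incl _hDom hPre
  obtain ⟨hg, ht, hroot, hcyc⟩ := hPre
  show get_structure_indices ri hs gov toks incl = get_structure_indices_alt ri hs gov toks incl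
  -- the common indices function
  set f : Int → List Int := fun p =>
    if incl then pvDescA hs (hs.length + 1) p ++ [p] else p :: pvKids hs p with hf
  -- B's step equals the clean step on every primary dep
  have hstepsB : ∀ (st : PySem.Dict String Int × PySem.Dict String (List Int) × PySem.Dict String (List String)),
      ∀ p ∈ pvKids hs ri,
      pvStepB (pvChildren hs) gov toks incl ((hs.length + 2) ^ (hs.length + 2)) st p
        = pvCleanTriple gov toks f st p := by
    intro st p hp
    have hpr := pvKids_mem hs ri p hp
    have hidx : (if incl then pvDfs (pvChildren hs) ((hs.length + 2) ^ (hs.length + 2))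
          ((pvChildren hs).getD p []) [] ++ [p]
        else p :: (pvChildren hs).getD p []) = f p := by
      rw [hf]
      cases incl with
      | false => simp [pvKids_eq]
      | true =>
        have hA : ∀ j : Int, 0 ≤ j → j < (hs.length : Int) →
            pvChase hs (hs.length + 1) j = true := by
          intro j h0 h1
          have := hcyc rfl j.toNat (List.mem_range.mpr (by omega))
          simpa [Int.toNat_of_nonneg h0] using this
        simp only [if_true]
        rw [pvKids_eq, pvDfs_desc hs hA p hpr.1 hpr.2.1]
    simp only [pvStepB, pvCleanTriple, hidx]
  -- A's step equals the clean step everywhere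
  have hstepsA : ∀ (st : PySem.Dict String Int × PySem.Dict String (List Int)) (p : Int),
      pvStepA hs gov incl st p = pvCleanPair gov f st p := by
    intro st p
    have hidx : (if incl then pvDescA hs (hs.length + 1) p ++ [p]
        else p :: ((PySem.List.enumerate hs).filter (fun q => q.2 == p)).map (fun q => q.1)) = f p := by
      rw [hf]; cases incl <;> simp [pvKids]
    simp only [pvStepA, PySem.Dict.modify, PySem.Dict.getD_insert_self, pvCleanPair, hidx]
  have hkA : ((PySem.List.enumerate hs).filter (fun p => p.2 == ri)).map (fun p => p.1)
      = pvKids hs ri := rfl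
  simp only [get_structure_indices, get_structure_indices_alt, hkA, pvKids_eq]
  rw [PySem.List.foldl_congr_mem (pvKids hs ri) _ (pvCleanTriple gov toks f) _
    (fun acc x hx => hstepsB acc x hx)]
  rw [PySem.List.foldl_congr_mem (pvKids hs ri) _ (pvCleanPair gov f) _
    (fun acc x _ => hstepsA acc x)]
  rw [pvLoopClean gov toks f (pvKids hs ri) PySem.Dict.empty PySem.Dict.empty PySem.Dict.empty rfl]
  -- both sides now talk about P := the clean pair fold
  refine Prod.ext rfl ?_
  -- second components: A's dict comprehension vs B's jointly built token dict
  have hnd : ((((pvKids hs ri).foldl (pvCleanPair gov f)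
      (PySem.Dict.empty, PySem.Dict.empty)).2).insert "root" (ri :: pvKids hs ri)).keys.Nodup :=
    PySem.Dict.nodup_keys_insert _ _ _
      (pvLoop_nodup gov f (pvKids hs ri) PySem.Dict.empty PySem.Dict.empty (by simp))
  have hfresh := PySem.Dict.items_foldl_insert_fresh
    (((((pvKids hs ri).foldl (pvCleanPair gov f)
        (PySem.Dict.empty, PySem.Dict.empty)).2).insert "root" (ri :: pvKids hs ri)).items)
    (fun kv => kv.1) (fun kv => kv.2.map (pvTok toks)) PySem.Dict.empty
    (fun a _ => rfl) hnd
  simp only [hfresh]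
  have hins := pvInsert_map (List.map (pvTok toks))
    (((pvKids hs ri).foldl (pvCleanPair gov f) (PySem.Dict.empty, PySem.Dict.empty)).2)
    (PySem.Dict.mk ((((pvKids hs ri).foldl (pvCleanPair gov f)
        (PySem.Dict.empty, PySem.Dict.empty)).2).items.map
      (fun kv => (kv.1, kv.2.map (pvTok toks))))) rfl "root" (ri :: pvKids hs ri)
  simp only [hins]
  simp [PySem.Dict.empty]
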